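-- pv_equiv track=rewrite | github.com/sealinglip/leecode | 1579.保证图可完全遍历.py | maxNumEdgesToRemove
-- ===== SOURCE A (Python) =====
-- from typing import List
-- import copy
--
-- class UnionFind:
--     def __init__(self, n: int):
--         # 节点号从1开始
--         self.group = list(range(n + 1))
--         self.groupSize = [1] * (n + 1)
--         self.n = n
--         self.groupCnt = n
--
--     def find(self, x: int) -> int:
--         if self.group[x] == x:
--             return x
--         self.group[x] = self.find(self.group[x])
--         return self.group[x]
--
--     def union(self, x: int, y: int) -> bool:
--         x, y = self.find(x), self.find(y)
--         if x == y: #已经是一组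
--             return False
--         if self.groupSize[x] < self.groupSize[y]:
--             x, y = y, x
--         self.group[y] = x # 小集合合并到大集合
--         self.groupSize[x] += self.groupSize[y]
--         self.groupCnt -= 1
--         return True
--
--     def isConnected(self, x: int, y: int) -> bool:
--         x, y = self.findset(x), self.findset(y)
--         return x == y
--
-- def maxNumEdgesToRemove(n: int, edges: List[List[int]]) -> int:
--     ufa = UnionFind(n)
--
--     res = 0
--     # 先处理公共边
--     for t, u, v in edges:
--         if t == 3:
--             if not ufa.union(u, v):
--                 res += 1
--
--     ufb = copy.deepcopy(ufa) # 克隆一份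
--     # 处理独占边
--     for t, u, v in edges:
--         if t == 1:
--             if not ufa.union(u, v):
--                 res += 1
--         elif t == 2:
--             if not ufb.union(u, v):
--                 res += 1
--
--     if ufa.groupCnt != 1 or ufb.groupCnt != 1:
--         return -1
--     return res
-- ===== SOURCE B (Python) =====
-- from typing import List
--
-- def relabel(lab, u, v):
--     # merge the components of u and v in a flat label array (eager quick-find relabeling)
--     ru, rv = lab[u], lab[v]
--     if ru != rv:
--         for i in range(len(lab)):
--             if lab[i] == rv:
--                 lab[i] = ru
--
-- def maxNumEdgesToRemove(n: int, edges: List[List[int]]) -> int: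
--     # Flat component-label arrays over the n+1 slots 0..n (slot 0 is the spare one the
--     # (n+1)-sized arrays carry); no union-find trees, no per-edge redundancy counting:
--     # the answer comes from a closed formula over the three component counts.
--     t1s, t2s, t3s = [], [], []
--     for t, u, v in edges:
--         if t == 1:
--             t1s.append((u, v))
--         elif t == 2:
--             t2s.append((u, v))
--         elif t == 3:
--             t3s.append((u, v))
--     la = list(range(n + 1))
--     lb = list(range(n + 1))
--     for u, v in t3s:                 # shared edges contract components in both graphs
--         relabel(la, u, v)
--         relabel(lb, u, v)
--     c3 = len(set(la))                # components after only the shared edges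
--     for u, v in t1s:
--         relabel(la, u, v)
--     for u, v in t2s:
--         relabel(lb, u, v)
--     if len(set(la)) != 2 or len(set(lb)) != 2:
--         return -1
--     # redundant = edges - (independent merges); with both graphs connected this is:
--     return len(t1s) + len(t2s) + len(t3s) - n + 3 - c3
-- ===== Notes on version B (the rewrite author's own statement) =====
-- stated objective: alternative
-- what changed: B replaces the union-find forests (recursive find with path compression, union by size, per-edge failure counter, deepcopy) by flat eager-relabeling component-label arrays and obtains the answer from a closed formula over the three component counts (m - n + 3 - c3), trading near-linear DSU time for the simpler O(n*E) quick-find.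
import Mathlib
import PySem

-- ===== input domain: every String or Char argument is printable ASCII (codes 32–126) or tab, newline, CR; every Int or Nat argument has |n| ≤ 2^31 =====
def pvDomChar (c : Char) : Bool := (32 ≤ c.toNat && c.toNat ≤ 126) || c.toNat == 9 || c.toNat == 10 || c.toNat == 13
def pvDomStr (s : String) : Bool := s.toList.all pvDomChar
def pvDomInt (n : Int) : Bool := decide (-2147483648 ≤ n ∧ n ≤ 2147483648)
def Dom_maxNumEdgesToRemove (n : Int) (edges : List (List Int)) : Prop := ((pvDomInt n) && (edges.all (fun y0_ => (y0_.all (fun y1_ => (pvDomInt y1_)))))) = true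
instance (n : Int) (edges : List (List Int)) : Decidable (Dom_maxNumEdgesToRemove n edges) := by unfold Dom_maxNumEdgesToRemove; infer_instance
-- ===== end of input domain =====

-- B replaces A's union-find forests (recursive find with path compression, union by size,
-- per-edge failure counter, deepcopy) by flat eager-relabeling component-label arrays and a
-- closed formula over the three component counts; equal return value on Pre_ (A mutates nothing
-- the caller observes).

-- ===== PORT A =====
-- the UnionFind class of Source A (group/groupSize lists, recursive find with path compression,
-- union by size); indexing uses PySem's Python-exact wrap-around get/set.
structure PVUF where
  group : List Int
  groupSize : List Int
  n : Int
  groupCnt : Int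
deriving DecidableEq, Repr

def pvGetI (xs : List Int) (i : Int) : Int := PySem.List.pyGetD xs i 0
def pvSetI (xs : List Int) (i v : Int) : List Int := PySem.List.pySetD xs i v

def pvUFInit (n : Int) : PVUF :=
  { group := PySem.List.pyRange 0 (n + 1) 1,
    groupSize := List.replicate (n + 1).toNat 1,
    n := n,
    groupCnt := n }

-- self.find with path compression; fuel n+2 bounds the recursion depth (the parent forest on the
-- n+1 nodes is acyclic, so the Python recursion never needs more) — the fuel-0 branch is
-- unreachable on states reached from inputs in Pre_.
def pvFind : Nat → PVUF → Int → Int × PVUF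
  | 0, uf, x => (x, uf)
  | f + 1, uf, x =>
    let gx := pvGetI uf.group x
    if gx = x then (x, uf)
    else
      let p := pvFind f uf gx
      let uf2 := { p.2 with group := pvSetI p.2.group x p.1 }
      (pvGetI uf2.group x, uf2)

def pvUnion (uf : PVUF) (x y : Int) : Bool × PVUF :=
  let px := pvFind (uf.n.toNat + 2) uf x
  let py := pvFind (px.2.n.toNat + 2) px.2 y
  let x1 := px.1
  let y1 := py.1
  let uf2 := py.2
  if x1 = y1 then (false, uf2)
  else
    let xy := if pvGetI uf2.groupSize x1 < pvGetI uf2.groupSize y1 then (y1, x1) else (x1, y1)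
    (true,
      { uf2 with
        group := pvSetI uf2.group xy.2 xy.1,
        groupSize := pvSetI uf2.groupSize xy.1 (pvGetI uf2.groupSize xy.1 + pvGetI uf2.groupSize xy.2),
        groupCnt := uf2.groupCnt - 1 })

-- `if not uf.union(u, v): res += 1` on state (uf, res)
def pvCountStep (s : PVUF × Int) (p : Int × Int) : PVUF × Int :=
  ((pvUnion s.1 p.1 p.2).2, if (pvUnion s.1 p.1 p.2).1 then s.2 else s.2 + 1)

-- A's first loop body: only t == 3 edges
def pvAStep3 (s : PVUF × Int) (e : List Int) : PVUF × Int :=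
  match e with
  | [t, u, v] => if t = 3 then pvCountStep s (u, v) else s
  | _ => s

-- A's second loop body: t == 1 into ufa, elif t == 2 into ufb, on state (ufa, ufb, res)
def pvAStep12 (s : PVUF × PVUF × Int) (e : List Int) : PVUF × PVUF × Int :=
  match e with
  | [t, u, v] =>
    if t = 1 then
      ((pvUnion s.1 u v).2, s.2.1, if (pvUnion s.1 u v).1 then s.2.2 else s.2.2 + 1)
    else if t = 2 then
      (s.1, (pvUnion s.2.1 u v).2, if (pvUnion s.2.1 u v).1 then s.2.2 else s.2.2 + 1)
    else s
  | _ => s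

def maxNumEdgesToRemove (n : Int) (edges : List (List Int)) : Int :=
  let s1 := edges.foldl pvAStep3 (pvUFInit n, (0 : Int))
  let ufb := s1.1          -- copy.deepcopy(ufa)
  let s2 := edges.foldl pvAStep12 (s1.1, ufb, s1.2)
  if s2.1.groupCnt ≠ 1 ∨ s2.2.1.groupCnt ≠ 1 then -1 else s2.2.2

-- ===== PORT B =====
-- Source B's bucketing pass: t1s / t2s / t3s built by appending, one scan of edges
def pvBucketStep (b : List (Int × Int) × List (Int × Int) × List (Int × Int)) (e : List Int) :
    List (Int × Int) × List (Int × Int) × List (Int × Int) :=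
  match e with
  | [t, u, v] =>
    if t = 1 then (b.1 ++ [(u, v)], b.2.1, b.2.2)
    else if t = 2 then (b.1, b.2.1 ++ [(u, v)], b.2.2)
    else if t = 3 then (b.1, b.2.1, b.2.2 ++ [(u, v)])
    else b
  | _ => b

-- Source B's relabel: read the two labels, and if distinct rewrite every slot holding rv to ru
-- (the Python index loop over lab is the elementwise map)
def pvRelabel (lab : List Int) (u v : Int) : List Int :=
  let ru := pvGetI lab u
  let rv := pvGetI lab v
  if ru ≠ rv then lab.map (fun e => if e = rv then ru else e) else lab

-- the shared-edge loop body: relabel in both label arrays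
def pvRelabelStep2 (s : List Int × List Int) (p : Int × Int) : List Int × List Int :=
  (pvRelabel s.1 p.1 p.2, pvRelabel s.2 p.1 p.2)

def maxNumEdgesToRemove_alt (n : Int) (edges : List (List Int)) : Int :=
  let bk := edges.foldl pvBucketStep ([], [], [])
  let la0 : List Int := PySem.List.pyRange 0 (n + 1) 1
  let s3 := bk.2.2.foldl pvRelabelStep2 (la0, la0)
  let c3 : Int := ((PySem.Set.ofList s3.1).length : Int)
  let la := bk.1.foldl (fun l (p : Int × Int) => pvRelabel l p.1 p.2) s3.1
  let lb := bk.2.1.foldl (fun l (p : Int × Int) => pvRelabel l p.1 p.2) s3.2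
  if ((PySem.Set.ofList la).length : Int) ≠ 2 ∨ ((PySem.Set.ofList lb).length : Int) ≠ 2 then -1
  else (bk.1.length : Int) + (bk.2.1.length : Int) + (bk.2.2.length : Int) - n + 3 - c3

-- ===== PRECONDITION & SPEC =====
-- Pre_ excludes exactly the inputs where the Python A raises: an edge that is not a triple
-- (ValueError on unpacking) or a relevant edge endpoint outside Python's list-index range
-- -(n+1) ≤ u,v ≤ n for the (n+1)-element DSU arrays (IndexError; also any relevant edge when n < 0).
def Pre_maxNumEdgesToRemove (n : Int) (edges : List (List Int)) : Prop :=
  ∀ e ∈ edges, e.length = 3 ∧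
    ((e.getD 0 0 = 1 ∨ e.getD 0 0 = 2 ∨ e.getD 0 0 = 3) →
      0 ≤ n ∧ -(n + 1) ≤ e.getD 1 0 ∧ e.getD 1 0 ≤ n ∧ -(n + 1) ≤ e.getD 2 0 ∧ e.getD 2 0 ≤ n)
instance (n : Int) (edges : List (List Int)) : Decidable (Pre_maxNumEdgesToRemove n edges) := by
  unfold Pre_maxNumEdgesToRemove; infer_instance

def pvWitness_maxNumEdgesToRemove : Int × List (List Int) := (3, [[3, 1, 2], [1, 2, 3], [2, 1, 3]])

def Spec_maxNumEdgesToRemove (n : Int) (edges : List (List Int)) (out : Int) : Prop := out = maxNumEdgesToRemove_alt n edges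
instance (n : Int) (edges : List (List Int)) (out : Int) : Decidable (Spec_maxNumEdgesToRemove n edges out) := by unfold Spec_maxNumEdgesToRemove; infer_instance

-- ===== CLAIM (what is proved, stated in full; the proofs are below) =====
def Claim_equal_maxNumEdgesToRemove : Prop := ∀ (n : Int) (edges : List (List Int)), Dom_maxNumEdgesToRemove n edges → Pre_maxNumEdgesToRemove n edges → Spec_maxNumEdgesToRemove n edges (maxNumEdgesToRemove n edges)

-- ===== LEMMAS AND PROOFS =====

-- ---- restructuring A's two interleaved loops into homogeneous per-type phases ----
def pvSel (t : Int) (e : List Int) : Option (Int × Int) :=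
  match e with
  | [t', u, v] => if t' = t then some (u, v) else none
  | _ => none

lemma pvSel_triple (s t u v : Int) : pvSel s [t, u, v] = if t = s then some (u, v) else none := rfl
lemma pvSel_nil (s : Int) : pvSel s [] = none := rfl
lemma pvSel_one (s t : Int) : pvSel s [t] = none := rfl
lemma pvSel_two (s t u : Int) : pvSel s [t, u] = none := rfl
lemma pvSel_long (s t u v w : Int) (r : List Int) : pvSel s (t :: u :: v :: w :: r) = none := rfl

lemma pvCountStep_apply (uf : PVUF) (r : Int) (p : Int × Int) :
    pvCountStep (uf, r) p = ((pvUnion uf p.1 p.2).2, if (pvUnion uf p.1 p.2).1 then r else r + 1) := rfl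

lemma pvBucket_eq (edges : List (List Int))
    (b : List (Int × Int) × List (Int × Int) × List (Int × Int)) :
    edges.foldl pvBucketStep b =
      (b.1 ++ edges.filterMap (pvSel 1), b.2.1 ++ edges.filterMap (pvSel 2),
       b.2.2 ++ edges.filterMap (pvSel 3)) := by
  induction edges generalizing b with
  | nil => simp
  | cons e rest ih =>
    rcases e with _ | ⟨t, _ | ⟨u, _ | ⟨v, _ | ⟨w, r⟩⟩⟩⟩ <;>
      simp only [List.foldl_cons, List.filterMap_cons, pvBucketStep, pvSel, ih] <;>
      split_ifs <;> simp_all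

lemma pvPhase1_eq (edges : List (List Int)) (s : PVUF × Int) :
    edges.foldl pvAStep3 s = (edges.filterMap (pvSel 3)).foldl pvCountStep s := by
  induction edges generalizing s with
  | nil => rfl
  | cons e rest ih =>
    rcases e with _ | ⟨t, _ | ⟨u, _ | ⟨v, _ | ⟨w, r⟩⟩⟩⟩ <;>
      simp only [List.foldl_cons, List.filterMap_cons, pvAStep3, pvSel, ih] <;>
      split_ifs <;> simp [List.foldl_cons]

lemma pvCount_shift (l : List (Int × Int)) (a : PVUF) (r k : Int) :
    l.foldl pvCountStep (a, r + k) =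
      ((l.foldl pvCountStep (a, r)).1, (l.foldl pvCountStep (a, r)).2 + k) := by
  induction l generalizing a r with
  | nil => rfl
  | cons p rest ih =>
    simp only [List.foldl_cons, pvCountStep]
    by_cases h : (pvUnion a p.1 p.2).1
    · simp only [h, if_true]; exact ih _ _
    · simp only [h]
      have : r + k + 1 = (r + 1) + k := by ring
      rw [this]; exact ih _ _

lemma pvPhase2_eq (edges : List (List Int)) (a b : PVUF) (r : Int) :
    edges.foldl pvAStep12 (a, b, r) =
      ( ((edges.filterMap (pvSel 1)).foldl pvCountStep (a, r)).1,
        ((edges.filterMap (pvSel 2)).foldl pvCountStep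
          (b, ((edges.filterMap (pvSel 1)).foldl pvCountStep (a, r)).2)).1,
        ((edges.filterMap (pvSel 2)).foldl pvCountStep
          (b, ((edges.filterMap (pvSel 1)).foldl pvCountStep (a, r)).2)).2 ) := by
  induction edges generalizing a b r with
  | nil => rfl
  | cons e rest ih =>
    rcases e with _ | ⟨t, _ | ⟨u, _ | ⟨v, _ | ⟨w, rr⟩⟩⟩⟩
    case nil =>
      simpa only [List.foldl_cons, List.filterMap_cons, pvAStep12, pvSel_nil] using ih a b r
    case cons.nil =>
      simpa only [List.foldl_cons, List.filterMap_cons, pvAStep12, pvSel_one] using ih a b r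
    case cons.cons.nil =>
      simpa only [List.foldl_cons, List.filterMap_cons, pvAStep12, pvSel_two] using ih a b r
    case cons.cons.cons.cons =>
      simpa only [List.foldl_cons, List.filterMap_cons, pvAStep12, pvSel_long] using ih a b r
    case cons.cons.cons.nil =>
      simp only [List.foldl_cons, List.filterMap_cons, pvAStep12, pvSel_triple]
      by_cases h1 : t = 1
      · simp only [h1, Int.reduceEq, reduceIte]
        rw [ih]
        simp [pvCountStep_apply]
      · by_cases h2 : t = 2
        · simp only [h2, Int.reduceEq, reduceIte]
          rw [ih]
          by_cases hok : (pvUnion b u v).1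
          · simp [hok, pvCountStep_apply]
          · simp only [if_neg hok]
            rw [pvCount_shift]
            simp [hok, pvCountStep_apply]
        · simp only [if_neg h1, if_neg h2]
          rw [ih]

-- ---- the parent forest of A's UnionFind, abstractly ----
def pvPar (g : List Int) (i : Nat) : Nat := (g.getD i 0).toNat
def pvReach (g : List Int) (i : Nat) : Prop :=
  ∃ k, pvPar g ((pvPar g)^[k] i) = (pvPar g)^[k] i

def pvDist (g : List Int) (i : Nat) (h : pvReach g i) : Nat := Nat.find h

-- fuel-bounded pure chase to the root (no compression)
def pvRtF : Nat → List Int → Nat → Nat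
  | 0, _, i => i
  | f + 1, g, i => if pvPar g i = i then i else pvRtF f g (pvPar g i)

def pvRoot (g : List Int) (i : Nat) : Nat := pvRtF (g.length + 1) g i

def pvGOK (g : List Int) (N : Nat) : Prop := g.length = N ∧ ∀ e ∈ g, 0 ≤ e ∧ e < (N : Int)
def pvAcy (g : List Int) (N : Nat) : Prop := ∀ i, i < N → pvReach g i

def pvNrm (N : Nat) (x : Int) : Nat := (if x < 0 then x + N else x).toNat
def pvInRange (N : Nat) (x : Int) : Prop := -(N : Int) ≤ x ∧ x < (N : Int)

-- state evolution of find: value and bookkeeping preserved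
def pvSame (uf uf' : PVUF) (N : Nat) : Prop :=
  pvGOK uf'.group N ∧ pvAcy uf'.group N ∧
  (∀ i, i < N → pvRoot uf'.group i = pvRoot uf.group i) ∧
  uf'.groupSize = uf.groupSize ∧ uf'.n = uf.n ∧ uf'.groupCnt = uf.groupCnt

-- the coupling invariant between A's DSU state and B's label array
def pvInv (n : Int) (N : Nat) (uf : PVUF) (lab : List Int) : Prop :=
  uf.n = n ∧ pvGOK uf.group N ∧ pvAcy uf.group N ∧ lab.length = N ∧
  (∀ i, i < N → ∃ m : Nat, m < N ∧ lab.getD i 0 = (m : Int)) ∧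
  (∀ i j, i < N → j < N →
    (lab.getD i 0 = lab.getD j 0 ↔ pvRoot uf.group i = pvRoot uf.group j)) ∧
  uf.groupCnt = ((PySem.Set.ofList lab).length : Int) - 1


-- ---- basic facts about the abstract parent forest ----
lemma pvPar_lt {g : List Int} {N : Nat} (hG : pvGOK g N) {i : Nat} (hi : i < N) :
    pvPar g i < N := by
  obtain ⟨hlen, hent⟩ := hG
  have hm : g.getD i 0 ∈ g := by
    rw [List.getD_eq_getElem g 0 (by omega)]
    exact List.getElem_mem _
  have := hent _ hm
  unfold pvPar
  omega

lemma pvIter_lt {g : List Int} {N : Nat} (hG : pvGOK g N) {i : Nat} (hi : i < N) :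
    ∀ k, (pvPar g)^[k] i < N := by
  intro k
  induction k with
  | zero => simpa
  | succ k ih =>
    rw [Function.iterate_succ_apply']
    exact pvPar_lt hG ih

lemma pvGetI_nat (g : List Int) (i : Nat) : pvGetI g (i : Int) = g.getD i 0 := by
  simp [pvGetI]

lemma pvNrm_lt {N : Nat} {x : Int} (hx : pvInRange N x) : pvNrm N x < N := by
  obtain ⟨h1, h2⟩ := hx
  unfold pvNrm
  split_ifs <;> omega

lemma pvNrm_natCast {N : Nat} {i : Nat} : pvNrm N (i : Int) = i := by
  unfold pvNrm
  split_ifs with h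
  · omega
  · simp

lemma pvGetI_nrm {g : List Int} {N : Nat} (hlen : g.length = N) {x : Int}
    (hx : pvInRange N x) : pvGetI g x = g.getD (pvNrm N x) 0 := by
  obtain ⟨h1, h2⟩ := hx
  by_cases hneg : x < 0
  · obtain ⟨k, hxk⟩ : ∃ k : Nat, x = -(k : Int) := ⟨(-x).toNat, by omega⟩
    subst hxk
    have h0k : 0 < k := by omega
    have hkN : k ≤ g.length := by omega
    rw [pvGetI, PySem.List.pyGetD_neg_natCast g k 0 h0k hkN]
    have hnr : pvNrm N (-(k : Int)) = g.length - k := by unfold pvNrm; split_ifs <;> omega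
    rw [hnr, List.getD_eq_getElem g 0 (by omega)]
  · obtain ⟨k, hxk⟩ : ∃ k : Nat, x = (k : Int) := ⟨x.toNat, by omega⟩
    subst hxk
    rw [pvGetI_nat, pvNrm_natCast]

lemma pvSetI_nrm {g : List Int} {N : Nat} (hlen : g.length = N) {x : Int}
    (hx : pvInRange N x) (v : Int) : pvSetI g x v = g.set (pvNrm N x) v := by
  obtain ⟨h1, h2⟩ := hx
  unfold pvSetI PySem.List.pySetD PySem.List.pySet? PySem.List.pyIdx?
  by_cases hneg : x < 0
  · have : pvNrm N x = g.length - (-x).toNat := by unfold pvNrm; split_ifs <;> omega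
    rw [this]
    split_ifs <;> simp_all <;> omega
  · have : pvNrm N x = x.toNat := by unfold pvNrm; split_ifs <;> omega
    rw [this]
    split_ifs <;> simp_all <;> omega

lemma pvReach_of_par {g : List Int} {i : Nat} (h : pvReach g (pvPar g i)) : pvReach g i := by
  obtain ⟨k, hk⟩ := h
  exact ⟨k + 1, by simpa [Function.iterate_succ_apply] using hk⟩

lemma pvReach_root {g : List Int} {i : Nat} (h : pvPar g i = i) : pvReach g i := ⟨0, h⟩

lemma pvDist_zero_iff {g : List Int} {i : Nat} (h : pvReach g i) :
    pvDist g i h = 0 ↔ pvPar g i = i := by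
  unfold pvDist
  rw [Nat.find_eq_zero]
  simp

lemma pvReach_par {g : List Int} {i : Nat} (h : pvReach g i) (hnr : pvPar g i ≠ i) :
    pvReach g (pvPar g i) := by
  obtain ⟨k, hk⟩ := h
  cases k with
  | zero => exact absurd hk hnr
  | succ k => exact ⟨k, by simpa [Function.iterate_succ_apply] using hk⟩

lemma pvDist_par {g : List Int} {i : Nat} (h : pvReach g i) (hnr : pvPar g i ≠ i) :
    pvDist g (pvPar g i) (pvReach_par h hnr) = pvDist g i h - 1 := by
  have hne : pvDist g i h ≠ 0 := by
    intro h0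
    exact hnr ((pvDist_zero_iff h).1 h0)
  unfold pvDist at *
  apply le_antisymm
  · apply Nat.find_le
    have hs := Nat.find_spec h
    rw [show Nat.find h = (Nat.find h - 1) + 1 from by omega, Function.iterate_succ_apply] at hs
    exact hs
  · by_contra hlt
    push_neg at hlt
    have h2 := Nat.find_spec (pvReach_par h hnr)
    have h3 : pvPar g ((pvPar g)^[Nat.find (pvReach_par h hnr) + 1] i) =
        (pvPar g)^[Nat.find (pvReach_par h hnr) + 1] i := by
      simpa [Function.iterate_succ_apply] using h2
    have hle : Nat.find h ≤ Nat.find (pvReach_par h hnr) + 1 := Nat.find_le h3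
    omega

lemma pvRtF_congr {g : List Int} : ∀ (fuel : Nat) (i : Nat) (h : pvReach g i),
    pvDist g i h < fuel → pvRtF fuel g i = (pvPar g)^[pvDist g i h] i := by
  intro fuel
  induction fuel with
  | zero => omega
  | succ f ih =>
    intro i h hd
    by_cases hr : pvPar g i = i
    · have h0 : pvDist g i h = 0 := (pvDist_zero_iff h).2 hr
      simp [pvRtF, hr, h0]
    · have hd' : pvDist g (pvPar g i) (pvReach_par h hr) = pvDist g i h - 1 := pvDist_par h hr
      have hne : pvDist g i h ≠ 0 := fun h0 => hr ((pvDist_zero_iff h).1 h0)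
      obtain ⟨d', hdeq⟩ : ∃ d', pvDist g i h = d' + 1 := ⟨pvDist g i h - 1, by omega⟩
      rw [pvRtF, if_neg hr, ih _ (pvReach_par h hr) (by omega), hd', hdeq,
        Nat.add_sub_cancel, Function.iterate_succ_apply]

lemma pvDist_lt {g : List Int} {N : Nat} (hG : pvGOK g N) {i : Nat} (hi : i < N)
    (h : pvReach g i) : pvDist g i h < N := by
  by_contra hge
  push_neg at hge
  unfold pvDist at hge
  have hmaps : Set.MapsTo (fun j => (pvPar g)^[j] i) ↑(Finset.range (N + 1)) ↑(Finset.range N) := by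
    intro j _
    simpa using pvIter_lt hG hi j
  have hcard : (Finset.range N).card < (Finset.range (N + 1)).card := by simp
  obtain ⟨a, ha, b, hb, hab, heq⟩ :=
    Finset.exists_ne_map_eq_of_card_lt_of_maps_to hcard hmaps
  simp only [Finset.mem_range] at ha hb
  have hroot : pvPar g ((pvPar g)^[Nat.find h] i) = (pvPar g)^[Nat.find h] i := Nat.find_spec h
  have key : ∀ (a b : Nat), a < b → b < N + 1 → (pvPar g)^[a] i = (pvPar g)^[b] i → False := by
    intro a b hlt hbN heq2
    have hsplit : (pvPar g)^[Nat.find h] i = (pvPar g)^[Nat.find h - b + a] i := by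
      calc (pvPar g)^[Nat.find h] i = (pvPar g)^[(Nat.find h - b) + b] i := by congr 1; omega
        _ = (pvPar g)^[Nat.find h - b] ((pvPar g)^[b] i) := by rw [Function.iterate_add_apply]
        _ = (pvPar g)^[Nat.find h - b] ((pvPar g)^[a] i) := by rw [heq2]
        _ = (pvPar g)^[(Nat.find h - b) + a] i := by rw [Function.iterate_add_apply]
    have hp : pvPar g ((pvPar g)^[Nat.find h - b + a] i) = (pvPar g)^[Nat.find h - b + a] i := by
      rw [← hsplit]; exact hroot
    exact Nat.find_min h (by omega) hp
  rcases Nat.lt_or_ge a b with hlt | hge2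
  · exact key a b hlt hb heq
  · exact key b a (by omega) ha heq.symm

lemma pvRoot_eq_iter {g : List Int} {N : Nat} (hG : pvGOK g N) {i : Nat} (hi : i < N)
    (h : pvReach g i) : pvRoot g i = (pvPar g)^[pvDist g i h] i := by
  unfold pvRoot
  have hlen := hG.1
  exact pvRtF_congr _ i h (by have := pvDist_lt hG hi h; omega)

lemma pvRoot_of_isRoot {g : List Int} {i : Nat} (hr : pvPar g i = i) : pvRoot g i = i := by
  unfold pvRoot pvRtF
  simp [hr]

lemma pvRoot_isRoot {g : List Int} {N : Nat} (hG : pvGOK g N) {i : Nat} (hi : i < N)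
    (h : pvReach g i) : pvPar g (pvRoot g i) = pvRoot g i := by
  rw [pvRoot_eq_iter hG hi h]
  exact Nat.find_spec h

lemma pvRoot_lt {g : List Int} {N : Nat} (hG : pvGOK g N) {i : Nat} (hi : i < N)
    (h : pvReach g i) : pvRoot g i < N := by
  rw [pvRoot_eq_iter hG hi h]
  exact pvIter_lt hG hi _

lemma pvRoot_par {g : List Int} {N : Nat} (hG : pvGOK g N) {i : Nat} (hi : i < N)
    (hnr : pvPar g i ≠ i) (h' : pvReach g (pvPar g i)) :
    pvRoot g i = pvRoot g (pvPar g i) := by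
  have hpl : pvPar g i < N := pvPar_lt hG hi
  have hd' : pvDist g (pvPar g i) h' < N := pvDist_lt hG hpl h'
  have hlen : g.length = N := hG.1
  unfold pvRoot
  rw [pvRtF, if_neg hnr]
  rw [pvRtF_congr _ _ h' (by omega), pvRtF_congr _ _ h' (by omega)]

-- ---- effect of the two kinds of parent updates on roots ----
lemma pvPar_set {g : List Int} {N : Nat} (hlen : g.length = N) {j : Nat} (hj : j < N)
    (v : Int) (i : Nat) (hi : i < N) :
    pvPar (g.set j v) i = if i = j then v.toNat else pvPar g i := by
  unfold pvPar
  have hi' : i < (g.set j v).length := by simp; omega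
  rw [List.getD_eq_getElem _ 0 hi', List.getElem_set]
  by_cases h : i = j
  · simp [h]
  · rw [if_neg (fun hh => h hh.symm), if_neg h, List.getD_eq_getElem _ 0 (by omega)]

lemma pvGOK_set {g : List Int} {N : Nat} (hG : pvGOK g N) {j : Nat} (hj : j < N)
    {r : Nat} (hr : r < N) : pvGOK (g.set j ((r : Nat) : Int)) N := by
  refine ⟨by simpa using hG.1, ?_⟩
  intro e he
  rcases List.mem_or_eq_of_mem_set he with h | h
  · exact hG.2 e h
  · subst h
    constructor
    · positivity
    · exact_mod_cast hr

lemma pvCompress_spec {g : List Int} {N : Nat} (hG : pvGOK g N) (hA : pvAcy g N)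
    {j : Nat} (hj : j < N) :
    pvGOK (g.set j ((pvRoot g j : Nat) : Int)) N ∧
    pvAcy (g.set j ((pvRoot g j : Nat) : Int)) N ∧
    (∀ i, i < N → pvRoot (g.set j ((pvRoot g j : Nat) : Int)) i = pvRoot g i) := by
  have hrN : pvRoot g j < N := pvRoot_lt hG hj (hA j hj)
  have hG' : pvGOK (g.set j ((pvRoot g j : Nat) : Int)) N := pvGOK_set hG hj hrN
  have hroot_r : pvPar g (pvRoot g j) = pvRoot g j := pvRoot_isRoot hG hj (hA j hj)
  have hpar' : ∀ i, i < N →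
      pvPar (g.set j ((pvRoot g j : Nat) : Int)) i = if i = j then pvRoot g j else pvPar g i := by
    intro i hi
    rw [pvPar_set hG.1 hj _ i hi]
    simp
  have base : ∀ i, i < N → pvPar g i = i →
      pvReach (g.set j ((pvRoot g j : Nat) : Int)) i ∧
      pvRoot (g.set j ((pvRoot g j : Nat) : Int)) i = pvRoot g i := by
    intro i hi hri
    by_cases hij : i = j
    · subst hij
      have hrj : pvRoot g i = i := pvRoot_of_isRoot hri
      have : pvPar (g.set i ((pvRoot g i : Nat) : Int)) i = i := by
        rw [hpar' i hi, if_pos rfl, hrj]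
      exact ⟨pvReach_root this, by rw [pvRoot_of_isRoot this, hrj]⟩
    · have : pvPar (g.set j ((pvRoot g j : Nat) : Int)) i = i := by
        rw [hpar' i hi, if_neg hij, hri]
      exact ⟨pvReach_root this, by rw [pvRoot_of_isRoot this, pvRoot_of_isRoot hri]⟩
  have key : ∀ d, ∀ i, i < N → ∀ (h : pvReach g i), pvDist g i h ≤ d →
      pvReach (g.set j ((pvRoot g j : Nat) : Int)) i ∧
      pvRoot (g.set j ((pvRoot g j : Nat) : Int)) i = pvRoot g i := by
    intro d
    induction d with
    | zero =>
      intro i hi h hd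
      exact base i hi ((pvDist_zero_iff h).1 (by omega))
    | succ d ih =>
      intro i hi h hd
      by_cases hri : pvPar g i = i
      · exact base i hi hri
      · have hpl : pvPar g i < N := pvPar_lt hG hi
        have h' : pvReach g (pvPar g i) := pvReach_par h hri
        have hd' : pvDist g (pvPar g i) h' ≤ d := by
          rw [pvDist_par h hri]; omega
        by_cases hij : i = j
        · subst hij
          have hrj : pvRoot g i ≠ i := fun hh => hri (hh ▸ hroot_r)
          have hparj : pvPar (g.set i ((pvRoot g i : Nat) : Int)) i = pvRoot g i := by
            rw [hpar' i hi, if_pos rfl]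
          have hroot'_r : pvPar (g.set i ((pvRoot g i : Nat) : Int)) (pvRoot g i) = pvRoot g i := by
            rw [hpar' _ hrN, if_neg hrj, hroot_r]
          have hre : pvReach (g.set i ((pvRoot g i : Nat) : Int)) (pvPar (g.set i ((pvRoot g i : Nat) : Int)) i) := by
            rw [hparj]; exact pvReach_root hroot'_r
          refine ⟨pvReach_of_par hre, ?_⟩
          rw [pvRoot_par hG' hi (by rw [hparj]; exact hrj) hre, hparj,
            pvRoot_of_isRoot hroot'_r]
        · have hpar'i : pvPar (g.set j ((pvRoot g j : Nat) : Int)) i = pvPar g i := by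
            rw [hpar' i hi, if_neg hij]
          obtain ⟨hre, hrt⟩ := ih (pvPar g i) hpl h' hd'
          have hre2 : pvReach (g.set j ((pvRoot g j : Nat) : Int)) (pvPar (g.set j ((pvRoot g j : Nat) : Int)) i) := by
            rw [hpar'i]; exact hre
          refine ⟨pvReach_of_par hre2, ?_⟩
          rw [pvRoot_par hG' hi (by rw [hpar'i]; exact hri) hre2, hpar'i, hrt,
            ← pvRoot_par hG hi hri h']
  refine ⟨hG', fun i hi => (key _ i hi (hA i hi) le_rfl).1,
    fun i hi => (key _ i hi (hA i hi) le_rfl).2⟩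

lemma pvUnionSet_spec {g : List Int} {N : Nat} (hG : pvGOK g N) (hA : pvAcy g N)
    {rx ry : Nat} (hx : rx < N) (hy : ry < N)
    (hxr : pvPar g rx = rx) (hyr : pvPar g ry = ry) (hne : ry ≠ rx) :
    pvGOK (g.set ry ((rx : Nat) : Int)) N ∧ pvAcy (g.set ry ((rx : Nat) : Int)) N ∧
    (∀ i, i < N →
      pvRoot (g.set ry ((rx : Nat) : Int)) i =
        if pvRoot g i = ry then rx else pvRoot g i) := by
  have hG' : pvGOK (g.set ry ((rx : Nat) : Int)) N := pvGOK_set hG hy hx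
  have hpar' : ∀ i, i < N →
      pvPar (g.set ry ((rx : Nat) : Int)) i = if i = ry then rx else pvPar g i := by
    intro i hi
    rw [pvPar_set hG.1 hy _ i hi]
    simp
  have hrootx' : pvPar (g.set ry ((rx : Nat) : Int)) rx = rx := by
    rw [hpar' rx hx, if_neg (fun hh => hne hh.symm), hxr]
  have base : ∀ i, i < N → pvPar g i = i →
      pvReach (g.set ry ((rx : Nat) : Int)) i ∧
      pvRoot (g.set ry ((rx : Nat) : Int)) i =
        if pvRoot g i = ry then rx else pvRoot g i := by
    intro i hi hri
    by_cases hiy : i = ry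
    · subst hiy
      have hpari : pvPar (g.set i ((rx : Nat) : Int)) i = rx := by
        rw [hpar' i hi, if_pos rfl]
      have hre : pvReach (g.set i ((rx : Nat) : Int)) (pvPar (g.set i ((rx : Nat) : Int)) i) := by
        rw [hpari]; exact pvReach_root hrootx'
      refine ⟨pvReach_of_par hre, ?_⟩
      rw [pvRoot_par hG' hi (by rw [hpari]; exact fun hh => hne hh.symm) hre, hpari,
        pvRoot_of_isRoot hrootx', pvRoot_of_isRoot hri, if_pos rfl]
    · have hpari : pvPar (g.set ry ((rx : Nat) : Int)) i = i := by
        rw [hpar' i hi, if_neg hiy, hri]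
      refine ⟨pvReach_root hpari, ?_⟩
      rw [pvRoot_of_isRoot hpari, pvRoot_of_isRoot hri, if_neg hiy]
  have key : ∀ d, ∀ i, i < N → ∀ (h : pvReach g i), pvDist g i h ≤ d →
      pvReach (g.set ry ((rx : Nat) : Int)) i ∧
      pvRoot (g.set ry ((rx : Nat) : Int)) i =
        if pvRoot g i = ry then rx else pvRoot g i := by
    intro d
    induction d with
    | zero =>
      intro i hi h hd
      exact base i hi ((pvDist_zero_iff h).1 (by omega))
    | succ d ih =>
      intro i hi h hd
      by_cases hri : pvPar g i = i
      · exact base i hi hri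
      · have hpl : pvPar g i < N := pvPar_lt hG hi
        have h' : pvReach g (pvPar g i) := pvReach_par h hri
        have hd' : pvDist g (pvPar g i) h' ≤ d := by
          rw [pvDist_par h hri]; omega
        have hiy : i ≠ ry := fun hh => hri (hh ▸ hyr)
        have hpar'i : pvPar (g.set ry ((rx : Nat) : Int)) i = pvPar g i := by
          rw [hpar' i hi, if_neg hiy]
        obtain ⟨hre, hrt⟩ := ih (pvPar g i) hpl h' hd'
        have hre2 : pvReach (g.set ry ((rx : Nat) : Int)) (pvPar (g.set ry ((rx : Nat) : Int)) i) := by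
          rw [hpar'i]; exact hre
        refine ⟨pvReach_of_par hre2, ?_⟩
        rw [pvRoot_par hG' hi (by rw [hpar'i]; exact hri) hre2, hpar'i, hrt,
          ← pvRoot_par hG hi hri h']
  refine ⟨hG', fun i hi => (key _ i hi (hA i hi) le_rfl).1,
    fun i hi => (key _ i hi (hA i hi) le_rfl).2⟩


-- ---- correctness of A's find (with path compression) and union ----
lemma pvGetD_par {g : List Int} {N : Nat} (hG : pvGOK g N) {i : Nat} (hi : i < N) :
    g.getD i 0 = ((pvPar g i : Nat) : Int) := by
  have hlen := hG.1
  have hm : g.getD i 0 ∈ g := by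
    rw [List.getD_eq_getElem g 0 (by omega)]
    exact List.getElem_mem _
  have := hG.2 _ hm
  unfold pvPar
  omega

lemma pvSame_trans {uf1 uf2 uf3 : PVUF} {N : Nat}
    (h1 : pvSame uf1 uf2 N) (h2 : pvSame uf2 uf3 N) : pvSame uf1 uf3 N := by
  obtain ⟨hG2, hA2, hr2, hs2, hn2, hc2⟩ := h1
  obtain ⟨hG3, hA3, hr3, hs3, hn3, hc3⟩ := h2
  exact ⟨hG3, hA3, fun i hi => (hr3 i hi).trans (hr2 i hi), hs3.trans hs2,
    hn3.trans hn2, hc3.trans hc2⟩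

lemma pvSame_refl (uf : PVUF) {N : Nat} (hG : pvGOK uf.group N) (hA : pvAcy uf.group N) :
    pvSame uf uf N := ⟨hG, hA, fun _ _ => rfl, rfl, rfl, rfl⟩

lemma pvFind_nat {N : Nat} (uf : PVUF) (hG : pvGOK uf.group N) (hA : pvAcy uf.group N) :
    ∀ (fuel : Nat) (i : Nat), i < N →
    ∀ (h : pvReach uf.group i), pvDist uf.group i h < fuel →
    (pvFind fuel uf (i : Int)).1 = ((pvRoot uf.group i : Nat) : Int) ∧
    pvSame uf (pvFind fuel uf (i : Int)).2 N := by
  intro fuel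
  induction fuel with
  | zero => omega
  | succ f ih =>
    intro i hi h hd
    have hgx : pvGetI uf.group (i : Int) = ((pvPar uf.group i : Nat) : Int) := by
      rw [pvGetI_nat]; exact pvGetD_par hG hi
    by_cases hr : pvPar uf.group i = i
    · have hrun : pvFind (f + 1) uf (i : Int) = ((i : Int), uf) := by
        simp [pvFind, hgx, hr]
      rw [hrun]
      exact ⟨by rw [pvRoot_of_isRoot hr], pvSame_refl uf hG hA⟩
    · have hcond : ((pvPar uf.group i : Nat) : Int) ≠ (i : Int) := by exact_mod_cast hr
      have hpl : pvPar uf.group i < N := pvPar_lt hG hi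
      have h' : pvReach uf.group (pvPar uf.group i) := pvReach_par h hr
      have hd' : pvDist uf.group (pvPar uf.group i) h' < f := by
        rw [pvDist_par h hr]
        have : pvDist uf.group i h ≠ 0 := fun h0 => hr ((pvDist_zero_iff h).1 h0)
        omega
      obtain ⟨hp1, hpS⟩ := ih (pvPar uf.group i) hpl h' hd'
      obtain ⟨hG2, hA2, hr2, hs2, hn2, hc2⟩ := hpS
      set p := pvFind f uf ((pvPar uf.group i : Nat) : Int) with hp
      have hroots : pvRoot uf.group (pvPar uf.group i) = pvRoot uf.group i :=
        (pvRoot_par hG hi hr h').symm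
      have hval : p.1 = ((pvRoot p.2.group i : Nat) : Int) := by
        rw [hp1, hroots, hr2 i hi]
      have hset : pvSetI p.2.group (i : Int) p.1 =
          p.2.group.set i ((pvRoot p.2.group i : Nat) : Int) := by
        rw [hval, pvSetI_nrm hG2.1 ⟨by omega, by omega⟩, pvNrm_natCast]
      obtain ⟨hG3, hA3, hr3⟩ := pvCompress_spec hG2 hA2 hi
      simp only [pvFind, hgx]
      rw [if_neg hcond, ← hp]
      dsimp only
      constructor
      · rw [hset, pvGetI_nat, List.getD_eq_getElem _ 0 (by simpa [hG2.1] using hi),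
          List.getElem_set, if_pos rfl, hr2 i hi]
      · refine pvSame_trans ⟨hG2, hA2, hr2, hs2, hn2, hc2⟩ ?_
        rw [hset]
        exact ⟨hG3, hA3, hr3, rfl, rfl, rfl⟩

lemma pvFind_int {N : Nat} (uf : PVUF) (hG : pvGOK uf.group N) (hA : pvAcy uf.group N)
    (fuel : Nat) (x : Int) (hx : pvInRange N x) (hfuel : N + 1 ≤ fuel) :
    (pvFind fuel uf x).1 = ((pvRoot uf.group (pvNrm N x) : Nat) : Int) ∧
    pvSame uf (pvFind fuel uf x).2 N := by
  obtain ⟨hx1, hx2⟩ := hx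
  by_cases hneg : x < 0
  · have hnx : pvNrm N x < N := pvNrm_lt ⟨hx1, hx2⟩
    obtain ⟨f, hf⟩ : ∃ f, fuel = f + 1 := ⟨fuel - 1, by omega⟩
    subst hf
    have hgx : pvGetI uf.group x = ((pvPar uf.group (pvNrm N x) : Nat) : Int) := by
      rw [pvGetI_nrm hG.1 ⟨hx1, hx2⟩]; exact pvGetD_par hG hnx
    have hcond : ((pvPar uf.group (pvNrm N x) : Nat) : Int) ≠ x := by
      intro hh; omega
    have hpl : pvPar uf.group (pvNrm N x) < N := pvPar_lt hG hnx
    have hd2 : ∀ (h' : pvReach uf.group (pvPar uf.group (pvNrm N x))),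
        pvDist uf.group (pvPar uf.group (pvNrm N x)) h' < f := by
      intro h'
      have := pvDist_lt hG hpl h'
      omega
    obtain ⟨hp1, hpS⟩ := pvFind_nat uf hG hA f (pvPar uf.group (pvNrm N x))
      hpl (hA _ hpl) (hd2 _)
    obtain ⟨hG2, hA2, hr2, hs2, hn2, hc2⟩ := hpS
    set p := pvFind f uf ((pvPar uf.group (pvNrm N x) : Nat) : Int) with hp
    have hroots : pvRoot uf.group (pvPar uf.group (pvNrm N x)) = pvRoot uf.group (pvNrm N x) := by
      by_cases hr : pvPar uf.group (pvNrm N x) = pvNrm N x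
      · rw [hr]
      · exact (pvRoot_par hG hnx hr (pvReach_par (hA _ hnx) hr)).symm
    have hval : p.1 = ((pvRoot p.2.group (pvNrm N x) : Nat) : Int) := by
      rw [hp1, hroots, hr2 _ hnx]
    have hset : pvSetI p.2.group x p.1 =
        p.2.group.set (pvNrm N x) ((pvRoot p.2.group (pvNrm N x) : Nat) : Int) := by
      rw [hval, pvSetI_nrm hG2.1 ⟨hx1, hx2⟩]
    obtain ⟨hG3, hA3, hr3⟩ := pvCompress_spec hG2 hA2 hnx
    simp only [pvFind, hgx]
    rw [if_neg hcond, ← hp]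
    dsimp only
    constructor
    · rw [hset, pvGetI_nrm (by simp [hG2.1]) ⟨hx1, hx2⟩,
        List.getD_eq_getElem _ 0 (by simpa [hG2.1] using hnx),
        List.getElem_set, if_pos rfl, hr2 _ hnx]
    · refine pvSame_trans ⟨hG2, hA2, hr2, hs2, hn2, hc2⟩ ?_
      rw [hset]
      exact ⟨hG3, hA3, hr3, rfl, rfl, rfl⟩
  · obtain ⟨k, hxk⟩ : ∃ k : Nat, x = (k : Int) := ⟨x.toNat, by omega⟩
    subst hxk
    have hkN : k < N := by omega
    have hres := pvFind_nat uf hG hA fuel k hkN (hA _ hkN)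
      (by have := pvDist_lt hG hkN (hA _ hkN); omega)
    rwa [pvNrm_natCast]

lemma pvSubst_iff {p q xi xj : Nat} (hne : p ≠ q) :
    ((if xi = q then p else xi) = (if xj = q then p else xj)) ↔
      (xi = xj ∨ ((xi = p ∨ xi = q) ∧ (xj = p ∨ xj = q))) := by
  split_ifs <;> omega

lemma pvUnion_spec {N : Nat} (uf : PVUF) (hfuel : N + 1 ≤ uf.n.toNat + 2)
    (hG : pvGOK uf.group N) (hA : pvAcy uf.group N) (u v : Int)
    (hu : pvInRange N u) (hv : pvInRange N v) :
    (pvUnion uf u v).2.n = uf.n ∧ pvGOK (pvUnion uf u v).2.group N ∧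
    pvAcy (pvUnion uf u v).2.group N ∧
    (if pvRoot uf.group (pvNrm N u) = pvRoot uf.group (pvNrm N v)
      then (pvUnion uf u v).1 = false ∧
           (∀ i, i < N → pvRoot (pvUnion uf u v).2.group i = pvRoot uf.group i) ∧
           (pvUnion uf u v).2.groupCnt = uf.groupCnt
      else (pvUnion uf u v).1 = true ∧
           (∀ i j, i < N → j < N →
             (pvRoot (pvUnion uf u v).2.group i = pvRoot (pvUnion uf u v).2.group j ↔
               (pvRoot uf.group i = pvRoot uf.group j ∨
                ((pvRoot uf.group i = pvRoot uf.group (pvNrm N u) ∨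
                  pvRoot uf.group i = pvRoot uf.group (pvNrm N v)) ∧
                 (pvRoot uf.group j = pvRoot uf.group (pvNrm N u) ∨
                  pvRoot uf.group j = pvRoot uf.group (pvNrm N v)))))) ∧
           (pvUnion uf u v).2.groupCnt = uf.groupCnt - 1) := by
  have hnu : pvNrm N u < N := pvNrm_lt hu
  have hnv : pvNrm N v < N := pvNrm_lt hv
  obtain ⟨hpx1, hpxS⟩ := pvFind_int uf hG hA (uf.n.toNat + 2) u hu hfuel
  set px := pvFind (uf.n.toNat + 2) uf u with hpx
  obtain ⟨hG2, hA2, hr2, hs2, hn2, hc2⟩ := hpxS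
  obtain ⟨hpy1, hpyS⟩ := pvFind_int px.2 hG2 hA2 (px.2.n.toNat + 2) v hv (by rw [hn2]; exact hfuel)
  set py := pvFind (px.2.n.toNat + 2) px.2 v with hpy
  obtain ⟨hG3, hA3, hr3, hs3, hn3, hc3⟩ := hpyS
  set ru := pvRoot uf.group (pvNrm N u) with hru_def
  set rv := pvRoot uf.group (pvNrm N v) with hrv_def
  have hru : px.1 = ((ru : Nat) : Int) := hpx1
  have hrv : py.1 = ((rv : Nat) : Int) := by
    rw [hpy1, hr2 _ hnv]
  have hrootsu3 : pvRoot py.2.group (pvNrm N u) = ru := by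
    rw [hr3 _ hnu, hr2 _ hnu]
  have hrootsv3 : pvRoot py.2.group (pvNrm N v) = rv := by
    rw [hr3 _ hnv, hr2 _ hnv]
  have hruN : ru < N := pvRoot_lt hG hnu (hA _ hnu)
  have hrvN : rv < N := pvRoot_lt hG hnv (hA _ hnv)
  have hisru : pvPar py.2.group ru = ru := by
    have := pvRoot_isRoot hG3 hnu (hA3 _ hnu)
    rwa [hrootsu3] at this
  have hisrv : pvPar py.2.group rv = rv := by
    have := pvRoot_isRoot hG3 hnv (hA3 _ hnv)
    rwa [hrootsv3] at this
  have hUn : pvUnion uf u v =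
      (if px.1 = py.1 then (false, py.2)
       else
        (true,
          { py.2 with
            group := pvSetI py.2.group
              ((if pvGetI py.2.groupSize px.1 < pvGetI py.2.groupSize py.1
                then (py.1, px.1) else (px.1, py.1)).2)
              ((if pvGetI py.2.groupSize px.1 < pvGetI py.2.groupSize py.1
                then (py.1, px.1) else (px.1, py.1)).1),
            groupSize := pvSetI py.2.groupSize
              ((if pvGetI py.2.groupSize px.1 < pvGetI py.2.groupSize py.1
                then (py.1, px.1) else (px.1, py.1)).1)
              (pvGetI py.2.groupSize
                ((if pvGetI py.2.groupSize px.1 < pvGetI py.2.groupSize py.1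
                  then (py.1, px.1) else (px.1, py.1)).1) +
               pvGetI py.2.groupSize
                ((if pvGetI py.2.groupSize px.1 < pvGetI py.2.groupSize py.1
                  then (py.1, px.1) else (px.1, py.1)).2)),
            groupCnt := py.2.groupCnt - 1 })) := by
    rfl
  by_cases heq : ru = rv
  · have hc : px.1 = py.1 := by rw [hru, hrv, heq]
    rw [hUn, if_pos hc, if_pos heq]
    exact ⟨hn3.trans hn2, hG3, hA3,
      rfl, fun i hi => by rw [hr3 i hi, hr2 i hi], hc3.trans hc2⟩
  · have hc : px.1 ≠ py.1 := by
      rw [hru, hrv]; exact_mod_cast heq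
    rw [hUn, if_neg hc, if_neg heq]
    by_cases hsz : pvGetI py.2.groupSize px.1 < pvGetI py.2.groupSize py.1
    · -- the slot of ru is pointed at rv
      rw [if_pos hsz]
      dsimp only
      have hset : pvSetI py.2.group px.1 py.1 = py.2.group.set ru ((rv : Nat) : Int) := by
        rw [hru, hrv, pvSetI_nrm hG3.1 ⟨by omega, by omega⟩, pvNrm_natCast]
      rw [hset]
      obtain ⟨hG4, hA4, hr4⟩ := pvUnionSet_spec hG3 hA3 hrvN hruN hisrv hisru heq
      have hri' : ∀ i, i < N → pvRoot (py.2.group.set ru ((rv : Nat) : Int)) i =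
          if pvRoot uf.group i = ru then rv else pvRoot uf.group i := by
        intro i hi
        rw [hr4 i hi, hr3 i hi, hr2 i hi]
      refine ⟨hn3.trans hn2, hG4, hA4, rfl, ?_, by rw [hc3, hc2]⟩
      intro i j hi hj
      rw [hri' i hi, hri' j hj, pvSubst_iff (show rv ≠ ru from fun hh => heq hh.symm)]
      tauto
    · -- the slot of rv is pointed at ru
      rw [if_neg hsz]
      dsimp only
      have hset : pvSetI py.2.group py.1 px.1 = py.2.group.set rv ((ru : Nat) : Int) := by
        rw [hru, hrv, pvSetI_nrm hG3.1 ⟨by omega, by omega⟩, pvNrm_natCast]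
      rw [hset]
      obtain ⟨hG4, hA4, hr4⟩ := pvUnionSet_spec hG3 hA3 hruN hrvN hisru hisrv
        (fun hh => heq hh.symm)
      have hri' : ∀ i, i < N → pvRoot (py.2.group.set rv ((ru : Nat) : Int)) i =
          if pvRoot uf.group i = rv then ru else pvRoot uf.group i := by
        intro i hi
        rw [hr4 i hi, hr3 i hi, hr2 i hi]
      refine ⟨hn3.trans hn2, hG4, hA4, rfl, ?_, by rw [hc3, hc2]⟩
      intro i j hi hj
      rw [hri' i hi, hri' j hj]
      exact pvSubst_iff heq


-- ---- B's label arrays: distinct counts and the relabel step ----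
lemma pvOfList_length (lab : List Int) :
    (PySem.Set.ofList lab).length = lab.toFinset.card := by
  have h1 : (PySem.Set.ofList lab).toFinset = lab.toFinset := by
    ext y
    simp [PySem.Set.mem_ofList]
  calc (PySem.Set.ofList lab).length = (PySem.Set.ofList lab).toFinset.card :=
        (List.toFinset_card_of_nodup (PySem.Set.nodup_ofList lab)).symm
    _ = lab.toFinset.card := by rw [h1]

lemma pvCount_merge {lab : List Int} {ru rv : Int} (hru : ru ∈ lab) (hrv : rv ∈ lab)
    (hne : ru ≠ rv) :
    ((PySem.Set.ofList (lab.map fun e => if e = rv then ru else e)).length : Int)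
      = ((PySem.Set.ofList lab).length : Int) - 1 := by
  rw [pvOfList_length, pvOfList_length]
  have hts : (lab.map fun e => if e = rv then ru else e).toFinset
      = insert ru (lab.toFinset.erase rv) := by
    ext y
    simp only [List.mem_toFinset, List.mem_map, Finset.mem_insert, Finset.mem_erase]
    constructor
    · rintro ⟨e, he, heq⟩
      by_cases h : e = rv
      · subst h
        rw [if_pos rfl] at heq
        exact Or.inl heq.symm
      · rw [if_neg h] at heq
        exact Or.inr ⟨heq ▸ h, heq ▸ he⟩
    · rintro (hyr | ⟨hne2, hy⟩)
      · subst hyr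
        exact ⟨y, hru, by rw [if_neg hne]⟩
      · exact ⟨y, hy, by rw [if_neg hne2]⟩
  rw [hts, Finset.card_insert_of_mem (Finset.mem_erase.2 ⟨hne, List.mem_toFinset.2 hru⟩),
    Finset.card_erase_of_mem (List.mem_toFinset.2 hrv)]
  have hpos : 0 < lab.toFinset.card := Finset.card_pos.2 ⟨rv, List.mem_toFinset.2 hrv⟩
  omega

lemma pvGetD_map_subst {lab : List Int} {i : Nat} (hi : i < lab.length) (ru rv : Int) :
    (lab.map fun e => if e = rv then ru else e).getD i 0
      = (if lab.getD i 0 = rv then ru else lab.getD i 0) := by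
  rw [List.getD_eq_getElem _ 0 (by simpa using hi), List.getD_eq_getElem _ 0 hi,
    List.getElem_map]

lemma pvSubst_iff_int {p q xi xj : Int} (hne : p ≠ q) :
    ((if xi = q then p else xi) = (if xj = q then p else xj)) ↔
      (xi = xj ∨ ((xi = p ∨ xi = q) ∧ (xj = p ∨ xj = q))) := by
  split_ifs <;> omega

lemma pvGetD_mem_self {lab : List Int} {i : Nat} (hi : i < lab.length) :
    lab.getD i 0 ∈ lab := by
  rw [List.getD_eq_getElem _ 0 hi]
  exact List.getElem_mem _

-- one edge: A's union and B's relabel stay coupled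
lemma pvStep_couple {n : Int} {N : Nat} (hN : N = n.toNat + 1)
    (uf : PVUF) (lab : List Int) (hI : pvInv n N uf lab)
    (u v : Int) (hu : pvInRange N u) (hv : pvInRange N v) :
    pvInv n N (pvUnion uf u v).2 (pvRelabel lab u v) ∧
    ((pvUnion uf u v).1 = true → (pvUnion uf u v).2.groupCnt = uf.groupCnt - 1) ∧
    ((pvUnion uf u v).1 = false → (pvUnion uf u v).2.groupCnt = uf.groupCnt) := by
  obtain ⟨hn, hG, hA, hlen, hent, hpart, hcnt⟩ := hI
  have hfuel : N + 1 ≤ uf.n.toNat + 2 := by rw [hn]; omega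
  have hnu := pvNrm_lt hu
  have hnv := pvNrm_lt hv
  obtain ⟨hUn_n, hUG, hUA, hUif⟩ := pvUnion_spec uf hfuel hG hA u v hu hv
  have hrel : pvRelabel lab u v =
      if lab.getD (pvNrm N u) 0 ≠ lab.getD (pvNrm N v) 0
      then lab.map (fun e => if e = lab.getD (pvNrm N v) 0 then lab.getD (pvNrm N u) 0 else e)
      else lab := by
    unfold pvRelabel
    rw [pvGetI_nrm hlen hu, pvGetI_nrm hlen hv]
  have hiff : (lab.getD (pvNrm N u) 0 = lab.getD (pvNrm N v) 0) ↔
      (pvRoot uf.group (pvNrm N u) = pvRoot uf.group (pvNrm N v)) :=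
    hpart _ _ hnu hnv
  by_cases heq : pvRoot uf.group (pvNrm N u) = pvRoot uf.group (pvNrm N v)
  · rw [if_pos heq] at hUif
    obtain ⟨hb, hroots, hcnt'⟩ := hUif
    have hlabeq : lab.getD (pvNrm N u) 0 = lab.getD (pvNrm N v) 0 := hiff.2 heq
    rw [hrel, if_neg (fun hh => hh hlabeq)]
    refine ⟨⟨hUn_n.trans hn, hUG, hUA, hlen, hent, ?_, by rw [hcnt', hcnt]⟩, ?_, fun _ => hcnt'⟩
    · intro i j hi hj
      rw [hpart i j hi hj, hroots i hi, hroots j hj]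
    · intro htr
      rw [hb] at htr
      exact absurd htr (by simp)
  · rw [if_neg heq] at hUif
    obtain ⟨hb, hpart', hcnt'⟩ := hUif
    have hlabne : lab.getD (pvNrm N u) 0 ≠ lab.getD (pvNrm N v) 0 := fun hh => heq (hiff.1 hh)
    rw [hrel, if_pos hlabne]
    have hmem_u : lab.getD (pvNrm N u) 0 ∈ lab := pvGetD_mem_self (by omega)
    have hmem_v : lab.getD (pvNrm N v) 0 ∈ lab := pvGetD_mem_self (by omega)
    refine ⟨⟨hUn_n.trans hn, hUG, hUA, by simpa using hlen, ?_, ?_, ?_⟩,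
      fun _ => hcnt', ?_⟩
    · intro i hi
      rw [pvGetD_map_subst (by omega) _ _]
      obtain ⟨m, hm, hmval⟩ := hent i hi
      obtain ⟨mu, hmu, hmuval⟩ := hent (pvNrm N u) hnu
      by_cases hcase : lab.getD i 0 = lab.getD (pvNrm N v) 0
      · rw [if_pos hcase, hmuval]
        exact ⟨mu, hmu, rfl⟩
      · rw [if_neg hcase, hmval]
        exact ⟨m, hm, rfl⟩
    · intro i j hi hj
      rw [pvGetD_map_subst (by omega) _ _, pvGetD_map_subst (by omega) _ _,
        pvSubst_iff_int hlabne, hpart' i j hi hj,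
        hpart i j hi hj, hpart i (pvNrm N u) hi hnu, hpart i (pvNrm N v) hi hnv,
        hpart j (pvNrm N u) hj hnu, hpart j (pvNrm N v) hj hnv]
    · rw [hcnt', hcnt, pvCount_merge hmem_u hmem_v hlabne]
    · intro hfls
      rw [hb] at hfls
      exact absurd hfls (by simp)

-- a whole phase: the per-edge failure counter against the closed count
lemma pvPhase_couple {n : Int} {N : Nat} (hN : N = n.toNat + 1) :
    ∀ (ps : List (Int × Int)) (uf : PVUF) (lab : List Int) (res : Int),
    pvInv n N uf lab → (∀ p ∈ ps, pvInRange N p.1 ∧ pvInRange N p.2) →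
    pvInv n N (ps.foldl pvCountStep (uf, res)).1
      (ps.foldl (fun l (p : Int × Int) => pvRelabel l p.1 p.2) lab) ∧
    (ps.foldl pvCountStep (uf, res)).2 =
      res + (ps.length : Int) - uf.groupCnt + (ps.foldl pvCountStep (uf, res)).1.groupCnt := by
  intro ps
  induction ps with
  | nil =>
    intro uf lab res hI hR
    exact ⟨hI, by simp⟩
  | cons p rest ih =>
    intro uf lab res hI hR
    obtain ⟨hI', htrue, hfalse⟩ := pvStep_couple hN uf lab hI p.1 p.2
      (hR p (List.mem_cons_self)).1 (hR p (List.mem_cons_self)).2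
    simp only [List.foldl_cons, pvCountStep_apply]
    by_cases hb : (pvUnion uf p.1 p.2).1
    · obtain ⟨ih1, ih2⟩ := ih (pvUnion uf p.1 p.2).2 (pvRelabel lab p.1 p.2) res hI'
        (fun q hq => hR q (List.mem_cons_of_mem _ hq))
      rw [if_pos hb]
      refine ⟨ih1, ?_⟩
      rw [ih2, htrue hb]
      simp only [List.length_cons]
      push_cast
      ring
    · obtain ⟨ih1, ih2⟩ := ih (pvUnion uf p.1 p.2).2 (pvRelabel lab p.1 p.2) (res + 1) hI'
        (fun q hq => hR q (List.mem_cons_of_mem _ hq))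
      rw [if_neg hb]
      refine ⟨ih1, ?_⟩
      rw [ih2, hfalse (by simpa using hb)]
      simp only [List.length_cons]
      push_cast
      ring

lemma pvFoldPair (ps : List (Int × Int)) : ∀ (a b : List Int),
    ps.foldl pvRelabelStep2 (a, b) =
      (ps.foldl (fun l (p : Int × Int) => pvRelabel l p.1 p.2) a,
       ps.foldl (fun l (p : Int × Int) => pvRelabel l p.1 p.2) b) := by
  induction ps with
  | nil => intro a b; rfl
  | cons p rest ih => intro a b; simp only [List.foldl_cons, pvRelabelStep2]; exact ih _ _

-- the initial coupled state
lemma pvInit_inv {n : Int} {N : Nat} (hN : N = n.toNat + 1) (h0 : 0 ≤ n) :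
    pvInv n N (pvUFInit n) (PySem.List.pyRange 0 (n + 1) 1) := by
  have hNn : (N : Int) = n + 1 := by omega
  have hlen : (PySem.List.pyRange 0 (n + 1) 1).length = N := by
    rw [PySem.List.length_pyRange_one]
    omega
  have hget : ∀ i : Nat, i < N → (PySem.List.pyRange 0 (n + 1) 1).getD i 0 = (i : Int) := by
    intro i hi
    rw [List.getD_eq_getElem _ 0 (by omega), PySem.List.getElem_pyRange_one]
    ring
  have hpar : ∀ i : Nat, i < N → pvPar (PySem.List.pyRange 0 (n + 1) 1) i = i := by
    intro i hi
    unfold pvPar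
    rw [hget i hi]
    simp
  have hG : pvGOK (PySem.List.pyRange 0 (n + 1) 1) N := by
    refine ⟨hlen, ?_⟩
    intro e he
    rw [PySem.List.mem_pyRange_one] at he
    omega
  unfold pvInv pvUFInit
  dsimp only
  refine ⟨rfl, hG, fun i hi => pvReach_root (hpar i hi), hlen, ?_, ?_, ?_⟩
  · intro i hi
    exact ⟨i, hi, hget i hi⟩
  · intro i j hi hj
    rw [hget i hi, hget j hj, pvRoot_of_isRoot (hpar i hi), pvRoot_of_isRoot (hpar j hj)]
    constructor
    · intro hh; exact_mod_cast hh
    · intro hh; exact_mod_cast hh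
  · rw [PySem.Set.ofList_eq_self_of_nodup _ (PySem.List.nodup_pyRange_one 0 (n + 1)), hlen]
    show n = (N : Int) - 1
    omega

-- the edges a phase processes are in index range (from Pre_)
lemma pvPairs_inRange {n : Int} {N : Nat} (hN : N = n.toNat + 1) {edges : List (List Int)}
    (hPre : Pre_maxNumEdgesToRemove n edges) {t : Int} (ht : t = 1 ∨ t = 2 ∨ t = 3) :
    ∀ p ∈ edges.filterMap (pvSel t), pvInRange N p.1 ∧ pvInRange N p.2 := by
  intro p hp
  rw [List.mem_filterMap] at hp
  obtain ⟨e, he, hsel⟩ := hp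
  rcases e with _ | ⟨t', _ | ⟨u, _ | ⟨v, _ | ⟨w, r⟩⟩⟩⟩ <;>
    simp only [pvSel_nil, pvSel_one, pvSel_two, pvSel_long, pvSel_triple,
      reduceCtorEq] at hsel
  split at hsel
  case isTrue htt =>
    obtain ⟨hh⟩ := hsel
    subst htt
    have hb := (hPre _ he).2 (by simpa using ht)
    obtain ⟨hb0, hb1, hb2, hb3, hb4⟩ := hb
    simp only [List.getD] at hb1 hb2 hb3 hb4
    constructor <;> constructor <;> simp_all <;> omega
  case isFalse => exact absurd hsel (by simp)

lemma pvNoRel {n : Int} {edges : List (List Int)}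
    (hPre : Pre_maxNumEdgesToRemove n edges) (hneg : n < 0) {t : Int}
    (ht : t = 1 ∨ t = 2 ∨ t = 3) :
    edges.filterMap (pvSel t) = [] := by
  rw [List.filterMap_eq_nil_iff]
  intro e he
  rcases e with _ | ⟨t', _ | ⟨u, _ | ⟨v, _ | ⟨w, r⟩⟩⟩⟩ <;>
    simp only [pvSel_nil, pvSel_one, pvSel_two, pvSel_long, pvSel_triple]
  split
  case isTrue htt =>
    subst htt
    have := ((hPre _ he).2 (by simpa using ht)).1
    omega
  case isFalse => rfl

-- ===== VERDICT (by name: the statement is the Claim_ definition above) =====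
theorem maxNumEdgesToRemove_spec : Claim_equal_maxNumEdgesToRemove := by
  intro n edges _ hPre
  show maxNumEdgesToRemove n edges = maxNumEdgesToRemove_alt n edges
  simp only [maxNumEdgesToRemove, maxNumEdgesToRemove_alt]
  rw [pvBucket_eq, pvPhase1_eq, pvPhase2_eq, pvFoldPair]
  simp only [List.nil_append]
  by_cases h0 : 0 ≤ n
  · set N := n.toNat + 1 with hN
    obtain ⟨hI3, hres3⟩ := pvPhase_couple (n := n) hN (edges.filterMap (pvSel 3)) (pvUFInit n)
      (PySem.List.pyRange 0 (n + 1) 1) 0 (pvInit_inv hN h0)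
      (pvPairs_inRange hN hPre (Or.inr (Or.inr rfl)))
    set s3A := (edges.filterMap (pvSel 3)).foldl pvCountStep (pvUFInit n, (0 : Int)) with hs3A
    set la3 := (edges.filterMap (pvSel 3)).foldl (fun l (p : Int × Int) => pvRelabel l p.1 p.2)
      (PySem.List.pyRange 0 (n + 1) 1) with hla3
    obtain ⟨hIA, hresA⟩ := pvPhase_couple hN (edges.filterMap (pvSel 1)) s3A.1 la3 s3A.2 hI3
      (pvPairs_inRange hN hPre (Or.inl rfl))
    set sA := (edges.filterMap (pvSel 1)).foldl pvCountStep (s3A.1, s3A.2) with hsA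
    set laF := (edges.filterMap (pvSel 1)).foldl (fun l (p : Int × Int) => pvRelabel l p.1 p.2)
      la3 with hlaF
    obtain ⟨hIB, hresB⟩ := pvPhase_couple hN (edges.filterMap (pvSel 2)) s3A.1 la3 sA.2 hI3
      (pvPairs_inRange hN hPre (Or.inr (Or.inl rfl)))
    set sB := (edges.filterMap (pvSel 2)).foldl pvCountStep (s3A.1, sA.2) with hsB
    set lbF := (edges.filterMap (pvSel 2)).foldl (fun l (p : Int × Int) => pvRelabel l p.1 p.2)
      la3 with hlbF
    have hc3 : s3A.1.groupCnt = ((PySem.Set.ofList la3).length : Int) - 1 := hI3.2.2.2.2.2.2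
    have hcA : sA.1.groupCnt = ((PySem.Set.ofList laF).length : Int) - 1 := hIA.2.2.2.2.2.2
    have hcB : sB.1.groupCnt = ((PySem.Set.ofList lbF).length : Int) - 1 := hIB.2.2.2.2.2.2
    have hcnt0 : (pvUFInit n).groupCnt = n := rfl
    rw [hcnt0] at hres3
    have hcond : (¬sA.1.groupCnt = 1 ∨ ¬sB.1.groupCnt = 1) ↔
        (¬((PySem.Set.ofList laF).length : Int) = 2 ∨
         ¬((PySem.Set.ofList lbF).length : Int) = 2) := by
      rw [hcA, hcB]
      omega
    rw [if_congr hcond rfl rfl]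
    split_ifs with hsplit
    · rfl
    · push_neg at hsplit
      obtain ⟨hA2, hB2⟩ := hsplit
      rw [hA2] at hcA
      rw [hB2] at hcB
      omega
  · have hl1 : edges.filterMap (pvSel 1) = [] := pvNoRel hPre (by omega) (Or.inl rfl)
    have hl2 : edges.filterMap (pvSel 2) = [] := pvNoRel hPre (by omega) (Or.inr (Or.inl rfl))
    have hl3 : edges.filterMap (pvSel 3) = [] := pvNoRel hPre (by omega) (Or.inr (Or.inr rfl))
    have hpr : PySem.List.pyRange 0 (n + 1) 1 = [] := PySem.List.pyRange_one_eq_nil (by omega)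
    rw [hl1, hl2, hl3, hpr]
    simp only [List.foldl_nil]
    rw [if_pos (Or.inl (show (pvUFInit n).groupCnt ≠ 1 from by
        show n ≠ 1; omega)),
      if_pos (Or.inl (show ((PySem.Set.ofList ([] : List Int)).length : Int) ≠ 2 from by decide))]
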